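-- pv_equiv track=rewrite | github.com/nermakov2903-lab/19-20_ | 19-20-main/task8.py | common_with_reversed
-- ===== SOURCE A (Python) =====
-- from typing import List, Set
--
-- def _rev_number(n: int) -> int:
--     """
--     Возвращает число, полученное инвертированием десятичной записи числа `n`.
--
--
--     Parameters
--     ----------
--     n : int
--     Входное число (может быть отрицательным — берётся абсолютное значение).
--
--
--     Returns
--     -------
--     int
--     Целое число, полученное зеркальным отражением цифр.
--
--
--     Examples
--     --------
--     >> _rev_number(120)
--     21
--     """
--     s = str(abs(int(n)))
--     return int(s[::-1])
--
-- def common_with_reversed(a: List[int], b: List[int]) -> int: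
--     """
--     Подсчитывает количество уникальных чисел из списка `a`, которые считаются
--     общими с `b` по следующему правилу: число из `a` считается общим, если
--     оно встречается в `b` напрямую, либо его перевёрнутая запись встречается в `b`.
--
--
--     Parameters
--     ----------
--     a : list of int
--     Список чисел A.
--     b : list of int
--     Список чисел B.
--
--
--     Returns
--     -------
--     int
--     Количество уникальных элементов из `a`, удовлетворяющих условию.
--
--
--     Examples
--     --------
--     >> common_with_reversed([12, 34, 21], [21, 43])
--     2
--     """
--     set_b = set(int(x) for x in b)
--     set_b_rev = set(_rev_number(x) for x in b)
--     seen = set()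
--     count = 0
--     for x in a:
--         xi = int(x)
--         if xi in seen:
--             continue
--         if xi in set_b or xi in set_b_rev:
--             count += 1
--             seen.add(xi)
--     return count
-- ===== SOURCE B (Python) =====
-- from typing import List
--
-- def _rev_number(n: int) -> int:
--     s = str(abs(int(n)))
--     return int(s[::-1])
--
-- def common_with_reversed(a: List[int], b: List[int]) -> int:
--     # Sort-based algorithm: merge-scan two strictly increasing lists with
--     # two pointers instead of hash-set membership tests in a loop.
--     xs = sorted({int(x) for x in a})
--     ys = sorted({int(x) for x in b} | {_rev_number(x) for x in b})
--     i = j = cnt = 0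
--     while i < len(xs) and j < len(ys):
--         if xs[i] == ys[j]:
--             cnt += 1
--             i += 1
--             j += 1
--         elif xs[i] < ys[j]:
--             i += 1
--         else:
--             j += 1
--     return cnt
--
-- if __name__ == "__main__":
--     print(common_with_reversed([12, 34, 21], [21, 43]))
-- ===== Notes on version B (the rewrite author's own statement) =====
-- stated objective: alternative
-- what changed: Replaces A's hash-set membership loop with a seen-set by a sort-based algorithm: sort the distinct a-values and the distinct (b union reversed-b) values and count common elements with a two-pointer merge scan.
import Mathlib
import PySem

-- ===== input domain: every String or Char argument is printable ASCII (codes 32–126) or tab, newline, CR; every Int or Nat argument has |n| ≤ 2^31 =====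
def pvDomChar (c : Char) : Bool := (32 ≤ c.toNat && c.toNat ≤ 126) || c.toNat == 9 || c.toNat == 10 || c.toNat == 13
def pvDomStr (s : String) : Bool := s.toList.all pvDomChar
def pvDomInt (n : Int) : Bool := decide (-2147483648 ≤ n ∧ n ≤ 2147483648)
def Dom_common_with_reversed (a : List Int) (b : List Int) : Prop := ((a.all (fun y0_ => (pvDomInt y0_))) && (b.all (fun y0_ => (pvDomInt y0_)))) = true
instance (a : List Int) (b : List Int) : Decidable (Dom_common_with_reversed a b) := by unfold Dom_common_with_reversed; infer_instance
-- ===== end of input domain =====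

-- B replaces A's hash-set membership loop with a seen-set by a sort-based algorithm:
-- sort the distinct a-values and the distinct (b ∪ reversed-b) values, count common
-- elements with a two-pointer merge scan (objective: alternative algorithm).

-- ===== PORT A =====
-- _rev_number: str(abs(int(n))), reversed (s[::-1] = reverse), then int(...).
-- int(...) never raises here (the reversed decimal digit string always parses), so .getD 0 is exact.
def revNum (n : Int) : Int :=
  let s := PySem.Int.toChars (n.natAbs : Int)
  (PySem.Int.ofChars? s.reverse).getD 0

def common_with_reversed (a : List Int) (b : List Int) : Int :=
  let setB : PySem.Set Int := PySem.Set.ofList b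
  let setBRev : PySem.Set Int := PySem.Set.ofList (b.map revNum)
  let res := a.foldl (fun (p : PySem.Set Int × Int) x =>
    if PySem.Set.contains p.1 x then p
    else if PySem.Set.contains setB x || PySem.Set.contains setBRev x then
      (PySem.Set.add p.1 x, p.2 + 1)
    else p) (PySem.Set.empty, 0)
  res.2

-- ===== PORT B =====
-- the while loop over indices i, j: transcribed as structural recursion on the two
-- sorted lists (advancing i / j = consuming a head); cnt accumulates as in Source B
def mergeCount : List Int → List Int → Int
  | [], _ => 0
  | _ :: _, [] => 0
  | x :: xs, y :: ys =>
    if x = y then mergeCount xs ys + 1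
    else if x < y then mergeCount xs (y :: ys)
    else mergeCount (x :: xs) ys
termination_by xs ys => xs.length + ys.length

def common_with_reversed_alt (a : List Int) (b : List Int) : Int :=
  let xs := PySem.List.sorted (PySem.Set.ofList a) (fun x => x) false
  let ys := PySem.List.sorted
    (PySem.Set.union (PySem.Set.ofList b) (PySem.Set.ofList (b.map revNum))) (fun x => x) false
  mergeCount xs ys

-- ===== PRECONDITION & SPEC =====
def Spec_common_with_reversed (a : List Int) (b : List Int) (out : Int) : Prop := out = common_with_reversed_alt a b
instance (a : List Int) (b : List Int) (out : Int) : Decidable (Spec_common_with_reversed a b out) := by unfold Spec_common_with_reversed; infer_instance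

-- ===== CLAIM (what is proved, stated in full; the proofs are below) =====
def Claim_equal_common_with_reversed : Prop := ∀ (a : List Int) (b : List Int), Dom_common_with_reversed a b → Spec_common_with_reversed a b (common_with_reversed a b)

-- ===== LEMMAS AND PROOFS =====

-- filtering through a discard drops nothing when the predicate already rejects the discarded element
theorem filter_discard (p : Int → Bool) (x : Int) (s : PySem.Set Int) (h : p x = false) :
    (PySem.Set.discard s x).filter p = s.filter p := by
  simp only [PySem.Set.discard, List.filter_filter]
  apply List.filter_congr
  intro y hy
  by_cases hyx : y = x
  · subst hyx; simp [h]
  · simp [hyx]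

-- Loop invariant for A's fold: the final counter is the initial counter plus the number of
-- distinct elements of `a` that are not yet in `seen` and satisfy the membership test `c`.
theorem loop_invariant (c : Int → Bool) (a : List Int) (seen : PySem.Set Int) (count : Int) :
    (a.foldl (fun (p : PySem.Set Int × Int) x =>
      if PySem.Set.contains p.1 x then p
      else if c x then (PySem.Set.add p.1 x, p.2 + 1)
      else p) (seen, count)).2
    = count + (((PySem.Set.ofList a).filter
        (fun x => !(PySem.Set.contains seen x) && c x)).length : Int) := by
  induction a generalizing seen count with
  | nil => simp [PySem.Set.ofList]
  | cons x xs ih =>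
    rw [List.foldl_cons, PySem.Set.ofList_cons, List.filter_cons]
    by_cases hx : x ∈ seen
    · have hcs : PySem.Set.contains seen x = true := (PySem.Set.contains_iff seen x).mpr hx
      have hpx : (!(PySem.Set.contains seen x) && c x) = false := by rw [hcs]; rfl
      simp only [hcs, if_true, Bool.not_true, Bool.false_and, Bool.false_eq_true, if_false]
      rw [ih, filter_discard _ _ _ hpx]
    · have hcs : PySem.Set.contains seen x = false := by
        cases h : PySem.Set.contains seen x with
        | false => rfl
        | true => exact absurd ((PySem.Set.contains_iff seen x).mp h) hx
      by_cases hcx : c x = true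
      · have hpx : (!(PySem.Set.contains seen x) && c x) = true := by rw [hcs, hcx]; rfl
        simp only [hcs, Bool.false_eq_true, if_false, hcx, if_true, Bool.not_false,
          Bool.true_and, List.length_cons]
        rw [ih]
        have hfe : ((PySem.Set.ofList xs).filter
              (fun y => !(PySem.Set.contains (PySem.Set.add seen x) y) && c y))
            = ((PySem.Set.discard (PySem.Set.ofList xs) x).filter
              (fun y => !(PySem.Set.contains seen y) && c y)) := by
          simp only [PySem.Set.discard, List.filter_filter]
          apply List.filter_congr
          intro y hy
          by_cases hyx : y = x
          · subst hyx
            have : y ∈ PySem.Set.add seen y := (PySem.Set.mem_add seen y y).mpr (Or.inr rfl)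
            simp [this]
          · have hmem : (y ∈ PySem.Set.add seen x) ↔ y ∈ seen := by
              rw [PySem.Set.mem_add]
              exact ⟨fun h => h.resolve_right hyx, Or.inl⟩
            have : PySem.Set.contains (PySem.Set.add seen x) y = PySem.Set.contains seen y := by
              cases h1 : PySem.Set.contains (PySem.Set.add seen x) y with
              | true => exact ((PySem.Set.contains_iff seen y).mpr
                  (hmem.mp ((PySem.Set.contains_iff _ y).mp h1))).symm
              | false =>
                cases h2 : PySem.Set.contains seen y with
                | false => rfl
                | true =>
                  rw [(PySem.Set.contains_iff _ y).mpr
                    (hmem.mpr ((PySem.Set.contains_iff seen y).mp h2))] at h1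
                  exact Bool.noConfusion h1
            simp [hyx]
        rw [hfe]
        push_cast
        ring
      · have hcx' : c x = false := by simpa using hcx
        have hpx : (!(PySem.Set.contains seen x) && c x) = false := by rw [hcs, hcx']; rfl
        simp only [hcs, Bool.false_eq_true, if_false, hcx', Bool.and_false]
        rw [ih, filter_discard _ _ _ hpx]

-- The two-pointer merge on strictly increasing lists counts the elements of xs lying in ys.
theorem mergeCount_eq_filter (xs ys : List Int)
    (hx : xs.Pairwise (· < ·)) (hy : ys.Pairwise (· < ·)) :
    mergeCount xs ys = ((xs.filter (fun x => decide (x ∈ ys))).length : Int) := by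
  induction xs, ys using mergeCount.induct with
  | case1 ys => simp [mergeCount]
  | case2 x xs => simp [mergeCount]
  | case3 xs y ys ih =>
    rw [List.pairwise_cons] at hx hy
    have hrest : ∀ z ∈ xs, (decide (z ∈ y :: ys) : Bool) = decide (z ∈ ys) := by
      intro z hz
      have hxz : y < z := hx.1 z hz
      have : (z ∈ y :: ys) ↔ z ∈ ys := by
        simp only [List.mem_cons]
        exact ⟨fun h => h.resolve_left (fun h' => absurd h' (by omega)), Or.inr⟩
      simp [this]
    rw [mergeCount, if_pos rfl, List.filter_cons,
        ih hx.2 hy.2, List.filter_congr hrest]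
    simp
  | case4 x xs y ys hne hlt ih =>
    rw [List.pairwise_cons] at hy
    have hnm : ¬ (x ∈ y :: ys) := by
      simp only [List.mem_cons]
      rintro (rfl | hm)
      · omega
      · exact absurd (hy.1 x hm) (by omega)
    rw [mergeCount, if_neg hne, if_pos hlt, List.filter_cons,
        ih (List.pairwise_cons.mp hx).2 (List.pairwise_cons.mpr hy)]
    simp [hnm]
  | case5 x xs y ys hne hge ih =>
    rw [List.pairwise_cons] at hy
    have hgt : y < x := by omega
    have hrest : ∀ z ∈ x :: xs, (decide (z ∈ y :: ys) : Bool) = decide (z ∈ ys) := by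
      intro z hz
      have hyz : y < z := by
        rcases List.mem_cons.mp hz with rfl | hm
        · exact hgt
        · exact lt_trans hgt ((List.pairwise_cons.mp hx).1 z hm)
      have : (z ∈ y :: ys) ↔ z ∈ ys := by
        simp only [List.mem_cons]
        exact ⟨fun h => h.resolve_left (fun h' => absurd h' (by omega)), Or.inr⟩
      simp [this]
    rw [mergeCount, if_neg hne, if_neg hge, ih hx hy.2, List.filter_congr hrest]

-- `contains` as decide of membership (Bool/Prop bridge used by the final proof)
theorem contains_eq_decide (s : PySem.Set Int) (y : Int) :
    PySem.Set.contains s y = decide (y ∈ s) := by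
  cases h : PySem.Set.contains s y with
  | true => exact (decide_eq_true ((PySem.Set.contains_iff s y).mp h)).symm
  | false =>
    have hm : y ∉ s := fun hm => Bool.noConfusion ((PySem.Set.contains_iff s y).mpr hm ▸ h)
    exact (decide_eq_false hm).symm

-- a sorted nodup list is strictly increasing
theorem sorted_nodup_pairwise_lt (s : List Int) (hnd : s.Nodup) :
    (PySem.List.sorted s (fun x => x) false).Pairwise (· < ·) := by
  have hle := PySem.List.sorted_pairwise s (fun x => x)
  have hnd' : (PySem.List.sorted s (fun x => x) false).Nodup :=
    (PySem.List.sorted_perm s (fun x => x) false).nodup_iff.mpr hnd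
  exact (hle.and hnd').imp (fun h => lt_of_le_of_ne h.1 h.2)

theorem common_with_reversed_spec : Claim_equal_common_with_reversed := by
  unfold Claim_equal_common_with_reversed
  intro a b _
  unfold Spec_common_with_reversed common_with_reversed common_with_reversed_alt
  rw [loop_invariant]
  set setB : PySem.Set Int := PySem.Set.ofList b with hsetB
  set setBRev : PySem.Set Int := PySem.Set.ofList (b.map revNum) with hsetBRev
  set u : PySem.Set Int := PySem.Set.union setB setBRev with hu
  have hund : u.Nodup := PySem.Set.nodup_union setB setBRev (PySem.Set.nodup_ofList b)
  have hys := sorted_nodup_pairwise_lt u hund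
  have hxs := sorted_nodup_pairwise_lt (PySem.Set.ofList a) (PySem.Set.nodup_ofList a)
  rw [mergeCount_eq_filter _ _ hxs hys]
  have hperm := PySem.List.sorted_perm (PySem.Set.ofList a) (fun x => x) false
  have hmem : ∀ z : Int,
      (decide (z ∈ PySem.List.sorted u (fun x => x) false) : Bool)
      = (!(PySem.Set.contains (PySem.Set.empty : PySem.Set Int) z)
          && (PySem.Set.contains setB z || PySem.Set.contains setBRev z)) := by
    intro z
    have h1 : (z ∈ PySem.List.sorted u (fun x => x) false) ↔ (z ∈ setB ∨ z ∈ setBRev) := by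
      rw [PySem.List.mem_sorted]
      exact PySem.Set.mem_union setB setBRev z
    have hce : PySem.Set.contains (PySem.Set.empty : PySem.Set Int) z = false := rfl
    rw [hce, contains_eq_decide setB z, contains_eq_decide setBRev z]
    simp [h1]
  calc ((0 : Int) + (((PySem.Set.ofList a).filter
          (fun x => !(PySem.Set.contains PySem.Set.empty x)
            && (PySem.Set.contains setB x || PySem.Set.contains setBRev x))).length : Int))
      = (((PySem.Set.ofList a).filter
          (fun z => decide (z ∈ PySem.List.sorted u (fun x => x) false))).length : Int) := by
        rw [zero_add, List.filter_congr (fun z _ => hmem z)]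
    _ = (((PySem.List.sorted (PySem.Set.ofList a) (fun x => x) false).filter
          (fun z => decide (z ∈ PySem.List.sorted u (fun x => x) false))).length : Int) := by
        rw [(hperm.filter _).length_eq]
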